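-- pv_equiv track=rewrite | github.com/serhiipriadko2-sys/liberiskraOm | tools/check_docs_sync.py | _has_conflict_marker
-- ===== SOURCE A (Python) =====
-- CONFLICT_LITERAL = "<" * 7 + " "
--
-- def _has_conflict_marker(line: str) -> bool:
--     start = 0
--     while True:
--         idx = line.find(CONFLICT_LITERAL, start)
--         if idx == -1:
--             return False
--         if idx == 0 or line[idx - 1] != "\\":
--             return True
--         start = idx + 1
-- ===== SOURCE B (Python) =====
-- CONFLICT_LITERAL = "<" * 7 + " "
--
-- def _has_conflict_marker(line: str) -> bool:
--     # Split on the literal: each boundary between adjacent segments is one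
--     # occurrence; it is unescaped iff the text before it is empty or does
--     # not end with a backslash. (The literal has no self-overlap, so split
--     # sees exactly the occurrences the find-loop sees.)
--     segments = line.split(CONFLICT_LITERAL)
--     for seg in segments[:-1]:
--         if not seg or seg[-1] != "\\":
--             return True
--     return False
-- ===== Notes on version B (the rewrite author's own statement) =====
-- stated objective: alternative
-- what changed: Replaced the find-with-restart index loop by a staged decomposition: split the line on the literal once, then scan the boundary segments, reporting True when a segment before a boundary is empty or does not end with a backslash.
import Mathlib
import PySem

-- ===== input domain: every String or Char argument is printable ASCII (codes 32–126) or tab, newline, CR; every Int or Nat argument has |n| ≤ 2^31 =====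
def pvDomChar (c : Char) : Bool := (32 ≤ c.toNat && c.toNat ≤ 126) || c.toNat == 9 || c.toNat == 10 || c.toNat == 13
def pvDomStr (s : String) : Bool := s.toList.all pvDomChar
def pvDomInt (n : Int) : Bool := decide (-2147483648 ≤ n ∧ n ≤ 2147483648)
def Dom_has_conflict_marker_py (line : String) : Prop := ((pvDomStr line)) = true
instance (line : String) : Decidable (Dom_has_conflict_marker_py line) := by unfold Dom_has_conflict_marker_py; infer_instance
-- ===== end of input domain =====

-- B replaces A's find-with-restart loop by splitting the line on the literal once
-- and scanning the boundary segments; objective: alternative decomposition.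

-- ===== PORT A =====
-- CONFLICT_LITERAL = "<" * 7 + " "
def pvMarker : List Char := "<<<<<<< ".toList

-- the while-True loop of A; fuel makes the loop total (s.length + 1 steps always suffice)
def pvLoopA (s : List Char) (start : Nat) : Nat → Bool
  | 0 => false
  | fuel + 1 =>
    let idx := PySem.Chars.findFrom s pvMarker (start : Int) none
    if idx = -1 then false
    else if idx = 0 ∨ PySem.List.pyGet? s (idx - 1) ≠ some '\\' then true
    else pvLoopA s (idx.toNat + 1) fuel

def has_conflict_marker_py (line : String) : Bool :=
  pvLoopA line.toList 0 (line.toList.length + 1)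

-- ===== PORT B =====
-- segments = line.split(CONFLICT_LITERAL); for seg in segments[:-1]:
--   if not seg or seg[-1] != "\\": return True
-- return False
def has_conflict_marker_py_alt (line : String) : Bool :=
  let segments := PySem.Chars.splitOn line.toList pvMarker
  (PySem.List.slice segments none (some (-1))).any fun seg =>
    seg.isEmpty || (PySem.List.pyGet? seg (-1) != some '\\')

-- ===== PRECONDITION & SPEC =====
def Spec_has_conflict_marker_py (line : String) (out : Bool) : Prop := out = has_conflict_marker_py_alt line
instance (line : String) (out : Bool) : Decidable (Spec_has_conflict_marker_py line out) := by unfold Spec_has_conflict_marker_py; infer_instance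

-- ===== CLAIM (what is proved, stated in full; the proofs are below) =====
def Claim_equal_has_conflict_marker_py : Prop := ∀ (line : String), Dom_has_conflict_marker_py line → Spec_has_conflict_marker_py line (has_conflict_marker_py line)

-- ===== LEMMAS AND PROOFS =====

-- the shared characterisation: an unescaped occurrence at index i ≥ start
def pvHit (s : List Char) (i : Nat) : Prop :=
  pvMarker <+: s.drop i ∧ (i = 0 ∨ PySem.List.pyGet? s ((i : Int) - 1) ≠ some '\\')

lemma pvLoopA_iff (s : List Char) (start fuel : Nat)
    (hs : start ≤ s.length) (hf : s.length + 1 ≤ fuel + start) :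
    pvLoopA s start fuel = true ↔ ∃ i, start ≤ i ∧ pvHit s i := by
  induction fuel generalizing start with
  | zero => omega
  | succ fuel ih =>
    rw [pvLoopA]
    by_cases hneg : PySem.Chars.findFrom s pvMarker (start : Int) none = -1
    · -- no further occurrence at all
      simp only [hneg, if_pos trivial]
      constructor
      · intro h; cases h
      · rintro ⟨i, hi, hp, -⟩
        rw [PySem.Chars.findFrom_natCast_eq_neg_one_iff s pvMarker start hs] at hneg
        exact absurd (List.IsInfix.trans hp.isInfix (by
          have : s.drop i = (s.drop start).drop (i - start) := by
            rw [List.drop_drop]; congr 1; omega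
          rw [this]; exact List.drop_suffix _ _ |>.isInfix)) hneg
    · obtain ⟨hle, hpre, hmin⟩ :=
        PySem.Chars.findFrom_natCast_spec s pvMarker start hs hneg
      set idx := PySem.Chars.findFrom s pvMarker (start : Int) none with hidx
      have hidx0 : 0 ≤ idx := le_trans (by exact_mod_cast Nat.zero_le start) hle
      have hidxnat : (idx.toNat : Int) = idx := Int.toNat_of_nonneg hidx0
      have hstartle : start ≤ idx.toNat := by omega
      have hidxlen : idx.toNat + 8 ≤ s.length := by
        have h := hpre.length_le
        rw [List.length_drop, (by decide : pvMarker.length = 8)] at h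
        omega
      by_cases hcond : idx = 0 ∨ PySem.List.pyGet? s (idx - 1) ≠ some '\\'
      · simp only [hneg, if_false, if_pos hcond]
        constructor
        · intro _
          refine ⟨idx.toNat, hstartle, hpre, ?_⟩
          rcases hcond with h0 | hne
          · left; omega
          · right; rwa [hidxnat]
        · intro _; trivial
      · simp only [hneg, if_false, if_neg hcond]
        push Not at hcond
        obtain ⟨hne0, hslash⟩ := hcond
        have hrec := ih (idx.toNat + 1) (by omega) (by omega)
        rw [hrec]
        constructor
        · rintro ⟨i, hi, hh⟩; exact ⟨i, by omega, hh⟩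
        · rintro ⟨i, hi, hh⟩
          refine ⟨i, ?_, hh⟩
          rcases Nat.lt_or_ge i (idx.toNat + 1) with hlt | hge
          · rcases Nat.lt_or_ge i idx.toNat with hlt' | hge'
            · exact absurd hh.1 (hmin i hi hlt')
            · have : i = idx.toNat := by omega
              subst this
              rcases hh.2 with h0 | hne
              · exact absurd (by omega : idx = 0) hne0
              · rw [hidxnat] at hne; exact absurd hslash hne
          · exact hge

-- ---- B side: the split recursion, made structural ----

-- the segments splitOn produces from state (l, cur): cur is the reversed pending prefix
def pvSegs : Nat → List Char → List Char → List (List Char)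
  | 0, l, cur => [cur.reverse ++ l]
  | _ + 1, [], cur => [cur.reverse]
  | fuel + 1, c :: rest, cur =>
    if pvMarker.isPrefixOf (c :: rest) then cur.reverse :: pvSegs fuel ((c :: rest).drop 8) []
    else pvSegs fuel rest (c :: cur)

lemma go_eq_pvSegs (fuel : Nat) (l cur : List Char) (acc : List (List Char)) :
    PySem.Chars.splitOn.go pvMarker fuel l cur acc = acc.reverse ++ pvSegs fuel l cur := by
  induction fuel generalizing l cur acc with
  | zero => rw [PySem.Chars.splitOn.go.eq_def]; simp [pvSegs]
  | succ fuel ih =>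
    rw [PySem.Chars.splitOn.go.eq_def]
    cases l with
    | nil => simp [pvSegs]
    | cons c rest =>
      by_cases hp : pvMarker.isPrefixOf (c :: rest)
      · simp only [hp, if_true, pvSegs, ih]
        simp [pvMarker]
      · simp [pvSegs, hp, ih]

lemma pvSegs_ne_nil (fuel : Nat) (l cur : List Char) : pvSegs fuel l cur ≠ [] := by
  match fuel, l with
  | 0, l => simp [pvSegs]
  | fuel + 1, [] => simp [pvSegs]
  | fuel + 1, c :: rest =>
    rw [pvSegs]
    split
    · simp
    · exact pvSegs_ne_nil fuel rest (c :: cur)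

-- the per-segment test, reduced: a segment cur.reverse is "bad" iff cur's head is not '\\'
lemma bad_reverse (cur : List Char) :
    (cur.reverse.isEmpty || (PySem.List.pyGet? cur.reverse (-1) != some '\\')) = true ↔
      cur.head? ≠ some '\\' := by
  cases cur with
  | nil => simp [PySem.List.pyGet?, PySem.List.pyIdx?]
  | cons c cs => simp [PySem.List.pyGet?, PySem.List.pyIdx?]

-- no self-overlap: the marker cannot start again within itself
lemma pvMarker_no_overlap {l : List Char} (h : pvMarker <+: l) :
    ∀ i, 1 ≤ i → i ≤ 7 → ¬ pvMarker <+: l.drop i := by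
  obtain ⟨r, rfl⟩ := h
  intro i h1 h7 hbad
  obtain ⟨t, ht⟩ := hbad
  have hdrop : (pvMarker ++ r).drop i = pvMarker.drop i ++ r := by
    rw [List.drop_append_of_le_length]
    simp [pvMarker]; omega
  rw [hdrop] at ht
  have h1' : (pvMarker.drop i ++ r)[7 - i]? = pvMarker[7]? := by
    rw [List.getElem?_append_left (by simp [pvMarker]; omega), List.getElem?_drop]
    congr 1; omega
  have h2' : (pvMarker ++ t)[7 - i]? = pvMarker[7 - i]? :=
    List.getElem?_append_left (by simp [pvMarker]; omega)
  rw [← ht, h2'] at h1'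
  interval_cases i <;> simp [pvMarker] at h1'

-- the main invariant for the split scan
lemma pvSegs_any (fuel : Nat) (l cur : List Char) (hf : l.length ≤ fuel) :
    ((pvSegs fuel l cur).dropLast.any fun seg =>
        seg.isEmpty || (PySem.List.pyGet? seg (-1) != some '\\')) = true ↔
      ∃ i : Nat, pvMarker <+: l.drop i ∧
        (if i = 0 then cur.head? else l[i - 1]?) ≠ some '\\' := by
  induction fuel generalizing l cur with
  | zero =>
    have : l = [] := by cases l <;> simp_all
    subst this
    simp [pvSegs, pvMarker]
  | succ fuel ih =>
    cases l with
    | nil => simp [pvSegs, pvMarker]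
    | cons c rest =>
      rw [pvSegs]
      by_cases hp : pvMarker.isPrefixOf (c :: rest)
      · have hpre : pvMarker <+: c :: rest := List.isPrefixOf_iff_prefix.mp hp
        have hlen8 : 8 ≤ (c :: rest).length := by simpa [pvMarker] using hpre.length_le
        have hrec := ih ((c :: rest).drop 8) [] (by rw [List.length_drop]; omega)
        have hbad : (cur.reverse.isEmpty = true ∨
            (PySem.List.pyGet? cur.reverse (-1) != some '\\') = true) ↔ cur.head? ≠ some '\\' := by
          rw [← Bool.or_eq_true]; exact bad_reverse cur
        simp only [hp, if_true,
          List.dropLast_cons_of_ne_nil (pvSegs_ne_nil fuel ((c :: rest).drop 8) []),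
          List.any_cons, Bool.or_eq_true, hbad, hrec]
        constructor
        · rintro (hcur | ⟨j, hj, hc⟩)
          · exact ⟨0, by simpa using hpre, by simpa using hcur⟩
          · refine ⟨8 + j, by rwa [List.drop_drop] at hj, ?_⟩
            rw [if_neg (by omega : ¬ (8 + j = 0))]
            rcases Nat.eq_zero_or_pos j with rfl | hj1
            · obtain ⟨t, ht⟩ := hpre
              rw [show (8 : Nat) + 0 - 1 = 7 from rfl, ← ht,
                List.getElem?_append_left (by simp [pvMarker])]
              simp [pvMarker]
            · rw [show 8 + j - 1 = 8 + (j - 1) from by omega, ← List.getElem?_drop]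
              simpa [if_neg (by omega : ¬ j = 0)] using hc
        · rintro ⟨i, hi, hc⟩
          rcases Nat.eq_zero_or_pos i with rfl | hi1
          · exact Or.inl (by simpa using hc)
          · rcases Nat.lt_or_ge i 8 with hlt | hge
            · exact absurd hi (pvMarker_no_overlap hpre i hi1 (by omega))
            · right
              refine ⟨i - 8, by rw [List.drop_drop, show 8 + (i - 8) = i from by omega]; exact hi, ?_⟩
              rcases Nat.eq_zero_or_pos (i - 8) with h8 | h8
              · simp [h8]
              · rw [if_neg (by omega), List.getElem?_drop,
                  show 8 + (i - 8 - 1) = i - 1 from by omega]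
                simpa [if_neg (by omega : ¬ i = 0)] using hc
      · have hnpre : ¬ pvMarker <+: c :: rest := fun h => hp (List.isPrefixOf_iff_prefix.mpr h)
        have hrec := ih rest (c :: cur) (by simp only [List.length_cons] at hf; omega)
        simp only [hp, Bool.false_eq_true, if_false, hrec]
        constructor
        · rintro ⟨j, hj, hc⟩
          refine ⟨j + 1, by simpa using hj, ?_⟩
          rw [if_neg (by omega), show j + 1 - 1 = j from by omega]
          rcases Nat.eq_zero_or_pos j with rfl | hj1
          · simpa using hc
          · rw [show j = (j - 1) + 1 from by omega, List.getElem?_cons_succ]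
            simpa [if_neg (by omega : ¬ j = 0)] using hc
        · rintro ⟨i, hi, hc⟩
          rcases Nat.eq_zero_or_pos i with rfl | hi1
          · exact absurd (by simpa using hi) hnpre
          · refine ⟨i - 1, by rw [show i = (i - 1) + 1 from by omega] at hi; simpa using hi, ?_⟩
            rw [if_neg (by omega : ¬ i = 0)] at hc
            rcases Nat.eq_zero_or_pos (i - 1) with h1 | h1
            · rw [if_pos h1]
              simpa [show i - 1 = 0 from h1] using hc
            · rw [if_neg (by omega)]
              rw [show i - 1 = (i - 1 - 1) + 1 from by omega, List.getElem?_cons_succ] at hc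
              exact hc

-- xs[:-1] is dropLast for nonempty xs
lemma slice_neg_one {α : Type} (xs : List α) (h : xs ≠ []) :
    PySem.List.slice xs none (some (-1)) = xs.dropLast := by
  have hn : 1 ≤ xs.length := List.length_pos_of_ne_nil h
  simp only [PySem.List.slice, PySem.List.clampIdx, List.dropLast_eq_take]
  norm_num
  split_ifs with h'
  · exact absurd h' h
  · omega

-- B equals the ∃-characterisation
lemma alt_iff (line : String) :
    has_conflict_marker_py_alt line = true ↔ ∃ i, pvHit line.toList i := by
  have hsplit : PySem.Chars.splitOn line.toList pvMarker
      = pvSegs (line.toList.length + 1) line.toList [] := by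
    unfold PySem.Chars.splitOn
    simpa using go_eq_pvSegs (line.toList.length + 1) line.toList [] []
  have hne := pvSegs_ne_nil (line.toList.length + 1) line.toList []
  show ((PySem.List.slice (PySem.Chars.splitOn line.toList pvMarker) none (some (-1))).any
      fun seg => seg.isEmpty || (PySem.List.pyGet? seg (-1) != some '\\')) = true ↔ _
  rw [hsplit, slice_neg_one _ hne,
    pvSegs_any (line.toList.length + 1) line.toList [] (by omega)]
  constructor
  · rintro ⟨i, h1, h2⟩
    refine ⟨i, h1, ?_⟩
    rcases Nat.eq_zero_or_pos i with rfl | hi1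
    · exact Or.inl rfl
    · right
      rw [show ((i : Int) - 1) = ((i - 1 : Nat) : Int) from by omega,
        PySem.List.pyGet?_natCast]
      simpa [if_neg (by omega : ¬ i = 0)] using h2
  · rintro ⟨i, h1, h2⟩
    refine ⟨i, h1, ?_⟩
    rcases Nat.eq_zero_or_pos i with rfl | hi1
    · simp
    · rw [if_neg (by omega : ¬ i = 0)]
      rcases h2 with h0 | h2
      · omega
      · rwa [show ((i : Int) - 1) = ((i - 1 : Nat) : Int) from by omega,
          PySem.List.pyGet?_natCast] at h2

-- ===== VERDICT (by name: the statement is the Claim_ definition above) =====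
theorem has_conflict_marker_py_spec : Claim_equal_has_conflict_marker_py := by
  intro line _
  unfold Spec_has_conflict_marker_py has_conflict_marker_py
  have hA := pvLoopA_iff line.toList 0 (line.toList.length + 1) (Nat.zero_le _) (by omega)
  have hB := alt_iff line
  rcases hb : has_conflict_marker_py_alt line with _ | _
  · rcases ha : pvLoopA line.toList 0 (line.toList.length + 1) with _ | _
    · rfl
    · exfalso
      obtain ⟨i, -, hh⟩ := hA.mp ha
      have := hB.mpr ⟨i, hh⟩
      rw [hb] at this; cases this
  · rcases hB.mp hb with ⟨i, hh⟩
    exact hA.mpr ⟨i, Nat.zero_le i, hh⟩
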